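-- pv_equiv track=rewrite | github.com/sjhallo07/cesar-assistant | cesar_assistant/app.py | resolve_model_order
-- ===== SOURCE A (Python) =====
-- def normalize_model_name(model_name):
--     if not model_name:
--         return None
--     return model_name if model_name.startswith("models/") else f"models/{model_name}"
--
-- def resolve_model_order(selected_model, model_candidates):
--     normalized_selected = normalize_model_name(selected_model)
--     ordered_candidates = []
--     seen_models = set()
--     if normalized_selected and normalized_selected in model_candidates:
--         ordered_candidates.append(normalized_selected)
--         seen_models.add(normalized_selected)
--     for candidate in model_candidates:
--         if candidate not in seen_models:
--             ordered_candidates.append(candidate)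
--             seen_models.add(candidate)
--     return ordered_candidates
-- ===== SOURCE B (Python) =====
-- def normalize_model_name(model_name):
--     if not model_name:
--         return None
--     return model_name if model_name.startswith("models/") else f"models/{model_name}"
--
-- def resolve_model_order(selected_model, model_candidates):
--     ordered = list(dict.fromkeys(model_candidates))
--     normalized_selected = normalize_model_name(selected_model)
--     if normalized_selected and normalized_selected in ordered:
--         ordered = [normalized_selected] + [m for m in ordered if m != normalized_selected]
--     return ordered
-- ===== Notes on version B (the rewrite author's own statement) =====
-- stated objective: simpler
-- what changed: B first deduplicates the whole candidate list with dict.fromkeys and then, if the normalized selected model is truthy and present, rebuilds the list with it floated to the front, instead of A's fused single pass that conditionally prepends and skips via a seen-set.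
import Mathlib
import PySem

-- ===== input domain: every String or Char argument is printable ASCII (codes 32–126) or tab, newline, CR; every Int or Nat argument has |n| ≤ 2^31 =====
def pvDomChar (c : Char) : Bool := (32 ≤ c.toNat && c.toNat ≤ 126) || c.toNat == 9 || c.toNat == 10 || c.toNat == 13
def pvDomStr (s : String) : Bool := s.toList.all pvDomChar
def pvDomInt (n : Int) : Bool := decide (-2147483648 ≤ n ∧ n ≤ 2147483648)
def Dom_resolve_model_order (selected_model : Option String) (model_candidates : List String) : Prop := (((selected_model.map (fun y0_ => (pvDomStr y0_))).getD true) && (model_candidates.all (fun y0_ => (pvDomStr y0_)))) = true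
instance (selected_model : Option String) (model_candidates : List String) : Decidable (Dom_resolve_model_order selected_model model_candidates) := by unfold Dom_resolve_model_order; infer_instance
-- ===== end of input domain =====

-- B replaces A's fused prepend-and-skip pass by dedup-first (dict.fromkeys) then float the
-- selected model to the front; objective: simpler decomposition, same cost.

-- ===== PORT A =====
-- shared module helper (identical in Source A and Source B)
def normalize_model_name (model_name : Option String) : Option String :=
  match model_name with
  | none => none
  | some s =>
    if s = "" then none
    else if PySem.Str.startswith s "models/" then some s else some ("models/" ++ s)

def resolve_model_order (selected_model : Option String) (model_candidates : List String) : List String :=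
  let normalized := normalize_model_name selected_model
  -- Python truthiness of the Option String: none and "" are falsy (the ≠ "" test)
  let init : List String × PySem.Set String :=
    match normalized with
    | some ns =>
      if ns ≠ "" ∧ model_candidates.contains ns then
        ([ns], PySem.Set.add PySem.Set.empty ns)
      else ([], PySem.Set.empty)
    | none => ([], PySem.Set.empty)
  (model_candidates.foldl
    (fun st c =>
      if PySem.Set.contains st.2 c then st else (st.1 ++ [c], PySem.Set.add st.2 c))
    init).1

-- ===== PORT B =====
def resolve_model_order_alt (selected_model : Option String) (model_candidates : List String) : List String :=
  let ordered := PySem.List.dedup model_candidates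
  match normalize_model_name selected_model with
  | some ns =>
    if ns ≠ "" ∧ ordered.contains ns then
      ns :: ordered.filter (fun m => !(m == ns))
    else ordered
  | none => ordered

-- ===== PRECONDITION & SPEC =====
def Spec_resolve_model_order (selected_model : Option String) (model_candidates : List String) (out : List String) : Prop := out = resolve_model_order_alt selected_model model_candidates
instance (selected_model : Option String) (model_candidates : List String) (out : List String) : Decidable (Spec_resolve_model_order selected_model model_candidates out) := by unfold Spec_resolve_model_order; infer_instance

-- ===== CLAIM (what is proved, stated in full; the proofs are below) =====
def Claim_equal_resolve_model_order : Prop := ∀ (selected_model : Option String) (model_candidates : List String), Dom_resolve_model_order selected_model model_candidates → Spec_resolve_model_order selected_model model_candidates (resolve_model_order selected_model model_candidates)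

-- ===== LEMMAS AND PROOFS =====

-- A's loop keeps its two components equal, so it is just folding Set.add
theorem pair_fold_eq (xs : List String) : ∀ s : List String,
    (xs.foldl
      (fun (st : List String × PySem.Set String) c =>
        if PySem.Set.contains st.2 c then st else (st.1 ++ [c], PySem.Set.add st.2 c))
      (s, s)).1 = xs.foldl PySem.Set.add s := by
  induction xs with
  | nil => intro s; rfl
  | cons x xs ih =>
    intro s
    simp only [List.foldl_cons]
    by_cases h : PySem.Set.contains s x = true
    · have ha : PySem.Set.add s x = s := by
        simp [PySem.Set.add, PySem.Set.contains] at h ⊢; simp [h]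
      rw [if_pos h, ha]; exact ih s
    · have hb : PySem.Set.contains s x = false := by simpa using h
      have ha : PySem.Set.add s x = s ++ [x] := by
        simp [PySem.Set.add, PySem.Set.contains] at hb ⊢; simp [hb]
      rw [if_neg h, ha]; exact ih (s ++ [x])

theorem contains_dedup (xs : List String) (a : String) :
    (PySem.List.dedup xs).contains a = xs.contains a := by
  simp

theorem fold_nil_case (xs : List String) :
    (xs.foldl
      (fun (st : List String × PySem.Set String) c =>
        if PySem.Set.contains st.2 c then st else (st.1 ++ [c], PySem.Set.add st.2 c))
      ([], PySem.Set.empty)).1 = PySem.List.dedup xs := by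
  rw [show (([], PySem.Set.empty) : List String × PySem.Set String)
        = ((([] : List String)), (([] : List String) : PySem.Set String)) from rfl]
  rw [pair_fold_eq]
  simp [PySem.List.dedup_eq_ofList, PySem.Set.ofList_eq_foldl]

-- ===== VERDICT (by name: the statement is the Claim_ definition above) =====
theorem resolve_model_order_spec : Claim_equal_resolve_model_order := by
  intro sel xs _
  unfold Spec_resolve_model_order resolve_model_order resolve_model_order_alt
  cases hn : normalize_model_name sel with
  | none => simpa using fold_nil_case xs
  | some ns =>
    simp only []
    by_cases hg : ns ≠ "" ∧ xs.contains ns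
    · rw [if_pos hg, if_pos (by rw [contains_dedup]; exact hg)]
      have hadd : PySem.Set.add PySem.Set.empty ns = [ns] := by
        simp [PySem.Set.add, PySem.Set.contains, PySem.Set.empty]
      rw [hadd]
      rw [show ((([ns] : List String), ([ns] : PySem.Set String))
            : List String × PySem.Set String)
            = (([ns] : List String), ([ns] : List String)) from rfl]
      rw [pair_fold_eq]
      have hu := PySem.Set.update_eq_append_filter [ns] xs
      rw [show xs.foldl PySem.Set.add [ns] = PySem.Set.update [ns] xs from rfl, hu]
      rw [PySem.List.dedup_eq_ofList]
      simp only [List.singleton_append, List.cons.injEq, true_and]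
      apply List.filter_congr
      intro y _
      simp only [PySem.Set.contains]
      rw [Bool.eq_iff_iff]; simp
    · rw [if_neg hg, if_neg (by rw [contains_dedup]; exact hg)]
      exact fold_nil_case xs
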